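-- pv_equiv track=rewrite | github.com/srichandra707/AI_Interviewer_Innov8_3.0_Finals | unixcoder-stuff/code5.py | _categorize_patterns_by_type
-- ===== SOURCE A (Python) =====
-- from typing import Dict, List, Tuple, Optional
-- from typing import Dict, List, Tuple, Optional
-- from typing import Dict, List, Optional, Tuple
-- from typing import Dict, List, Tuple, Set, Optional
--
-- def _categorize_patterns_by_type(patterns: List[str]) -> Set[str]:
--     """Categorize patterns by their type for diversity analysis"""
--
--     pattern_categories = {
--         'algorithmic': {
--             'dynamic_programming', 'recursion', 'divide_conquer', 'backtracking',
--             'greedy_choice', 'binary_search'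
--         },
--         'data_structure': {
--             'hash_map', 'hash_set', 'heap_usage', 'stack_usage', 'queue_usage',
--             'trie_usage', 'segment_tree', 'fenwick_tree', 'union_find'
--         },
--         'optimization': {
--             'two_pointers', 'sliding_window', 'monotonic_stack', 'space_optimization',
--             'time_optimization', 'cache_optimization', 'lazy_propagation'
--         },
--         'graph': {
--             'graph_dfs', 'graph_bfs', 'topological_sort', 'shortest_path',
--             'minimum_spanning_tree'
--         },
--         'string': {
--             'string_operations', 'string_matching', 'pattern_matching', 'text_processing'
--         },
--         'mathematical': {
--             'number_theory', 'combinatorics', 'probability', 'bit_manipulation'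
--         },
--         'implementation': {
--             'array_manipulation', 'iteration', 'conditional_logic', 'sorting'
--         }
--     }
--
--     categories_found = set()
--
--     for pattern in patterns:
--         for category, category_patterns in pattern_categories.items():
--             if pattern in category_patterns:
--                 categories_found.add(category)
--                 break
--
--     return categories_found
-- ===== SOURCE B (Python) =====
-- from typing import Dict, List, Tuple, Set, Optional
--
-- def _categorize_patterns_by_type(patterns: List[str]) -> Set[str]:
--     """Categorize patterns by their type for diversity analysis"""
--
--     pattern_categories = {
--         'algorithmic': {
--             'dynamic_programming', 'recursion', 'divide_conquer', 'backtracking',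
--             'greedy_choice', 'binary_search'
--         },
--         'data_structure': {
--             'hash_map', 'hash_set', 'heap_usage', 'stack_usage', 'queue_usage',
--             'trie_usage', 'segment_tree', 'fenwick_tree', 'union_find'
--         },
--         'optimization': {
--             'two_pointers', 'sliding_window', 'monotonic_stack', 'space_optimization',
--             'time_optimization', 'cache_optimization', 'lazy_propagation'
--         },
--         'graph': {
--             'graph_dfs', 'graph_bfs', 'topological_sort', 'shortest_path',
--             'minimum_spanning_tree'
--         },
--         'string': {
--             'string_operations', 'string_matching', 'pattern_matching', 'text_processing'
--         },
--         'mathematical': {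
--             'number_theory', 'combinatorics', 'probability', 'bit_manipulation'
--         },
--         'implementation': {
--             'array_manipulation', 'iteration', 'conditional_logic', 'sorting'
--         }
--     }
--
--     # Flatten the table into a (pattern, category) list sorted by pattern (the
--     # pattern strings are pairwise distinct, so the order is well defined), then
--     # binary-search it per input pattern instead of scanning the category sets.
--     table = sorted(((p, c) for c, ms in pattern_categories.items() for p in ms),
--                    key=lambda e: e[0])
--
--     categories_found = set()
--     for pattern in patterns:
--         lo, hi = 0, len(table)
--         while lo < hi:
--             mid = (lo + hi) // 2
--             if table[mid][0] < pattern: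
--                 lo = mid + 1
--             else:
--                 hi = mid
--         if lo < len(table) and table[lo][0] == pattern:
--             categories_found.add(table[lo][1])
--     return categories_found
-- ===== Notes on version B (the rewrite author's own statement) =====
-- stated objective: alternative
-- what changed: Flattens the seven category sets once into a (pattern, category) table sorted by pattern and binary-searches that table per input pattern, instead of A's inner linear scan over the category sets with a break; correct because the pattern strings across categories are pairwise distinct.
import Mathlib
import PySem

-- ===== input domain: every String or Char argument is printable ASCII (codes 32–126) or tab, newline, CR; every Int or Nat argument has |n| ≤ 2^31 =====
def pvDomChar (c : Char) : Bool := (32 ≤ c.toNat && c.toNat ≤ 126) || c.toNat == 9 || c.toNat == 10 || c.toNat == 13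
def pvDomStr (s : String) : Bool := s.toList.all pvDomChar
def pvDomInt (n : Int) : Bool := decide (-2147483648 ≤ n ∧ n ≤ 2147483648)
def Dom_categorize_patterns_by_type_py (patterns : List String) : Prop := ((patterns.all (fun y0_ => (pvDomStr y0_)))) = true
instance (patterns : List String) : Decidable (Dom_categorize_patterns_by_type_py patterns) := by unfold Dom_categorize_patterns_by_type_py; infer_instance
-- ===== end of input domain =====

-- B flattens the category table once into a (pattern, category) list sorted by pattern and
-- binary-searches it per input pattern, replacing A's inner linear scan over the seven
-- category sets (objective: alternative — a different data structure and search, same output set).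

-- ===== PORT A =====
-- the pattern_categories dict: (category, member set) pairs in insertion order
def pvCats : List (String × List String) :=
  [ ("algorithmic", ["dynamic_programming", "recursion", "divide_conquer", "backtracking",
      "greedy_choice", "binary_search"]),
    ("data_structure", ["hash_map", "hash_set", "heap_usage", "stack_usage", "queue_usage",
      "trie_usage", "segment_tree", "fenwick_tree", "union_find"]),
    ("optimization", ["two_pointers", "sliding_window", "monotonic_stack", "space_optimization",
      "time_optimization", "cache_optimization", "lazy_propagation"]),
    ("graph", ["graph_dfs", "graph_bfs", "topological_sort", "shortest_path",
      "minimum_spanning_tree"]),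
    ("string", ["string_operations", "string_matching", "pattern_matching", "text_processing"]),
    ("mathematical", ["number_theory", "combinatorics", "probability", "bit_manipulation"]),
    ("implementation", ["array_manipulation", "iteration", "conditional_logic", "sorting"]) ]

-- A's inner 'for category, category_patterns in …: if pattern in …: add; break':
-- scan the items, returning the first category containing the pattern (the break)
def pvFindCat (cats : List (String × List String)) (p : String) : Option String :=
  match cats with
  | [] => none
  | (c, ms) :: rest => if ms.contains p then some c else pvFindCat rest p

def categorize_patterns_by_type_py (patterns : List String) : List String :=
  patterns.foldl (fun found pattern =>
    match pvFindCat pvCats pattern with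
    | some c => PySem.Set.add found c
    | none => found) PySem.Set.empty

-- ===== PORT B =====
-- table = sorted(((p, c) for c, ms in pattern_categories.items() for p in ms), key=lambda e: e[0])
-- (the pattern strings are pairwise distinct, so the sorted order is independent of the
-- set-iteration order of the generator; the flatMap below lists the same pairs)
def pvTable : List (String × String) :=
  PySem.List.sorted (pvCats.flatMap (fun cm => cm.2.map (fun p => (p, cm.1)))) (fun e => e.1) false

-- the 'while lo < hi: mid = (lo+hi)//2; …' binary-search loop, returning the final lo.
-- fuel = (hi-lo).toNat only makes the loop total: each iteration shrinks hi-lo by ≥ 1.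
def pvBSgo (table : List (String × String)) (pattern : String) : Nat → Int → Int → Int
  | 0, lo, _ => lo
  | fuel + 1, lo, hi =>
    if lo < hi then
      -- mid = (lo + hi) // 2; Python's '<' on str is code-point lexicographic = '<' on .toList (exact, per PySem)
      if (PySem.List.pyGetD table (PySem.Int.floordiv (lo + hi) 2) ("", "")).1.toList < pattern.toList then
        pvBSgo table pattern fuel (PySem.Int.floordiv (lo + hi) 2 + 1) hi
      else
        pvBSgo table pattern fuel lo (PySem.Int.floordiv (lo + hi) 2)
    else lo

def pvBS (table : List (String × String)) (pattern : String) (lo hi : Int) : Int :=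
  pvBSgo table pattern (hi - lo).toNat lo hi

def categorize_patterns_by_type_py_alt (patterns : List String) : List String :=
  patterns.foldl (fun found pattern =>
    if pvBS pvTable pattern 0 (PySem.List.len pvTable) < PySem.List.len pvTable &&
        (PySem.List.pyGetD pvTable (pvBS pvTable pattern 0 (PySem.List.len pvTable)) ("", "")).1 == pattern then
      PySem.Set.add found (PySem.List.pyGetD pvTable (pvBS pvTable pattern 0 (PySem.List.len pvTable)) ("", "")).2
    else found) PySem.Set.empty

-- ===== PRECONDITION & SPEC =====
def Spec_categorize_patterns_by_type_py (patterns : List String) (out : List String) : Prop := out = categorize_patterns_by_type_py_alt patterns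
instance (patterns : List String) (out : List String) : Decidable (Spec_categorize_patterns_by_type_py patterns out) := by unfold Spec_categorize_patterns_by_type_py; infer_instance

-- ===== CLAIM (what is proved, stated in full; the proofs are below) =====
def Claim_equal_categorize_patterns_by_type_py : Prop := ∀ (patterns : List String), Dom_categorize_patterns_by_type_py patterns → Spec_categorize_patterns_by_type_py patterns (categorize_patterns_by_type_py patterns)

-- ===== LEMMAS AND PROOFS =====

-- every pattern string occurring in pvCats
def pvAllPats : List String := pvCats.flatMap (·.2)

lemma pvFindCat_none (p : String) (h : p ∉ pvAllPats) : pvFindCat pvCats p = none := by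
  simp only [pvAllPats, pvCats, List.flatMap_cons, List.flatMap_nil, List.append_nil,
    List.mem_append, List.mem_cons, List.not_mem_nil, or_false, not_or] at h
  simp [pvFindCat, pvCats, h]

-- the search result stays inside [lo, hi]
lemma pvBSgo_bounds (table : List (String × String)) (p : String) (fuel : Nat) :
    ∀ lo hi : Int, lo ≤ hi → lo ≤ pvBSgo table p fuel lo hi ∧ pvBSgo table p fuel lo hi ≤ hi := by
  induction fuel with
  | zero => intro lo hi h; simp [pvBSgo]; omega
  | succ n ih =>
    intro lo hi h
    rw [pvBSgo]
    split
    · next hlt =>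
      rw [PySem.Int.floordiv_eq_ediv_of_pos (by omega)]
      split
      · have := ih ((lo + hi) / 2 + 1) hi (by omega)
        omega
      · have := ih lo ((lo + hi) / 2) (by omega)
        omega
    · omega

-- the sorted table, spelled out: it is the unique strictly-key-increasing rearrangement
set_option maxRecDepth 8192 in
lemma pvTableLit : pvTable =
  [ ("array_manipulation", "implementation"), ("backtracking", "algorithmic"),
    ("binary_search", "algorithmic"), ("bit_manipulation", "mathematical"),
    ("cache_optimization", "optimization"), ("combinatorics", "mathematical"),
    ("conditional_logic", "implementation"), ("divide_conquer", "algorithmic"),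
    ("dynamic_programming", "algorithmic"), ("fenwick_tree", "data_structure"),
    ("graph_bfs", "graph"), ("graph_dfs", "graph"),
    ("greedy_choice", "algorithmic"), ("hash_map", "data_structure"),
    ("hash_set", "data_structure"), ("heap_usage", "data_structure"),
    ("iteration", "implementation"), ("lazy_propagation", "optimization"),
    ("minimum_spanning_tree", "graph"), ("monotonic_stack", "optimization"),
    ("number_theory", "mathematical"), ("pattern_matching", "string"),
    ("probability", "mathematical"), ("queue_usage", "data_structure"),
    ("recursion", "algorithmic"), ("segment_tree", "data_structure"),
    ("shortest_path", "graph"), ("sliding_window", "optimization"),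
    ("sorting", "implementation"), ("space_optimization", "optimization"),
    ("stack_usage", "data_structure"), ("string_matching", "string"),
    ("string_operations", "string"), ("text_processing", "string"),
    ("time_optimization", "optimization"), ("topological_sort", "graph"),
    ("trie_usage", "data_structure"), ("two_pointers", "optimization"),
    ("union_find", "data_structure") ] := by
  apply PySem.List.sorted_eq_of_perm_of_pairwise_lt
  · decide
  · simp only [String.lt_iff_toList_lt]
    decide

-- every first component in the sorted table is one of the 39 pattern strings
set_option maxRecDepth 8192 in
lemma pvTable_fst_mem : ∀ e ∈ pvTable, e.1 ∈ pvAllPats := by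
  rw [pvTableLit]; decide

-- match-vs-if bridge for the per-pattern step
lemma pvStepBridge (c : Bool) (v : String × String) (acc : List String) :
    (match (if c then some v.2 else none) with
      | some y => PySem.Set.add acc y
      | none => acc) = if c then PySem.Set.add acc v.2 else acc := by
  cases c <;> rfl

-- per-pattern agreement: A's first-match scan equals B's binary-search lookup
set_option maxHeartbeats 4000000 in
set_option maxRecDepth 16384 in
lemma pvCat_agree (p : String) :
    pvFindCat pvCats p =
      (if pvBS pvTable p 0 (PySem.List.len pvTable) < PySem.List.len pvTable &&
          (PySem.List.pyGetD pvTable (pvBS pvTable p 0 (PySem.List.len pvTable)) ("", "")).1 == p then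
        some (PySem.List.pyGetD pvTable (pvBS pvTable p 0 (PySem.List.len pvTable)) ("", "")).2
      else none) := by
  rw [pvTableLit]
  by_cases h : p ∈ pvAllPats
  · fin_cases h <;> decide
  · rw [← pvTableLit, pvFindCat_none p h]
    by_cases hr : pvBS pvTable p 0 (PySem.List.len pvTable) < PySem.List.len pvTable
    · have hb := pvBSgo_bounds pvTable p ((PySem.List.len pvTable : Int) - 0).toNat 0
        (PySem.List.len pvTable) (by simp [PySem.List.len_eq])
      have hrange : PySem.Raise.InRange pvTable.length
          (pvBS pvTable p 0 (PySem.List.len pvTable)) := by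
        have h1 := hb.1
        rw [show pvBS pvTable p 0 (PySem.List.len pvTable) =
            pvBSgo pvTable p ((PySem.List.len pvTable : Int) - 0).toNat 0
              (PySem.List.len pvTable) from rfl] at hr ⊢
        simp only [PySem.List.len_eq] at hr h1 ⊢
        constructor
        · omega
        · exact hr
      have hmem := PySem.List.pyGetD_mem (xs := pvTable)
        (i := pvBS pvTable p 0 (PySem.List.len pvTable)) (d := ("", "")) hrange
      have hne : (PySem.List.pyGetD pvTable (pvBS pvTable p 0 (PySem.List.len pvTable)) ("", "")).1 ≠ p := by
        intro he; exact h (he ▸ pvTable_fst_mem _ hmem)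
      rw [if_neg]
      intro hc
      rw [Bool.and_eq_true, beq_iff_eq] at hc
      exact hne hc.2
    · rw [if_neg]
      intro hc
      rw [Bool.and_eq_true, decide_eq_true_eq] at hc
      exact hr hc.1

-- ===== VERDICT (by name: the statement is the Claim_ definition above) =====
theorem categorize_patterns_by_type_py_spec : Claim_equal_categorize_patterns_by_type_py := by
  intro patterns _
  unfold Spec_categorize_patterns_by_type_py
  unfold categorize_patterns_by_type_py categorize_patterns_by_type_py_alt
  apply PySem.List.foldl_congr_mem
  intro acc x _
  rw [pvCat_agree x, pvStepBridge]
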